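-- pv_equiv track=rewrite | github.com/ccsvip/human_backend | core/services/v1/llm_handler_chat_messages.py | find_natural_break
-- ===== SOURCE A (Python) =====
-- def find_natural_break(text:str, min_len=50) -> int:
--     """ 智能寻找自然断句点 """
--
--     # 优先查找句末标点（可扩展）
--     punctuations = {'。', '！', '？', '…', ';', '，', '.'}
--
--     # 反向查找最近的标点（从min_len位置向前找）
--     for i in range(min_len, 0, -1):
--         if i < len(text) and text[i] in punctuations:
--             return i + 1 # 包括标点
--
--     # 找不到则向前找最近的空格
--     for i in range(min_len, 0, -1):
--         if i < len(text) and text[i].isspace():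
--             return i + 1
--
--     # 最后按最小长度影切分
--     return min(min_len, len(text))
-- ===== SOURCE B (Python) =====
-- def find_natural_break(text: str, min_len=50) -> int:
--     """Single backward pass: return at the first (highest) punctuation;
--     remember only the first (highest) space as a fallback."""
--     punctuations = {'。', '！', '？', '…', ';', '，', '.'}
--     n = len(text)
--     space_pos = None
--     for i in range(min_len, 0, -1):
--         if i < n and text[i] in punctuations:
--             return i + 1
--         if space_pos is None and i < n and text[i].isspace():
--             space_pos = i
--     if space_pos is not None:
--         return space_pos + 1
--     return min(min_len, n)
-- ===== Notes on version B (the rewrite author's own statement) =====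
-- stated objective: alternative
-- what changed: A makes two separate backward scans over range(min_len,0,-1) (one for punctuation, then one for spaces); B makes a single backward pass that returns immediately on the first punctuation and merely records the first space seen as a fallback used after the loop.
import Mathlib
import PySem

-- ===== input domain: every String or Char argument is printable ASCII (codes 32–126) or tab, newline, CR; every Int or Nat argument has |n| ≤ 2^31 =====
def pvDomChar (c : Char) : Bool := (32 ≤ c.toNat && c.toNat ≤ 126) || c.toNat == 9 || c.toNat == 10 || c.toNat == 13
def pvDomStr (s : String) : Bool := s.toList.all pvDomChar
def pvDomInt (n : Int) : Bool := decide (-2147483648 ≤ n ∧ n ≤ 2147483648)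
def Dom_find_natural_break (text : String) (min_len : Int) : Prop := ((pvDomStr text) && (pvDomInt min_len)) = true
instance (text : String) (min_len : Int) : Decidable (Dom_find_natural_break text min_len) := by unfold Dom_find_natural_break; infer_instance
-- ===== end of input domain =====

-- B replaces A's two backward scans by one backward pass (return on punctuation, record
-- the first space as fallback); same result, one pass instead of two (objective: alternative).

-- shared character test: "i < len(text) and p(text[i])" (identical in both Pythons)
def fnbPunct (c : Char) : Bool :=
  c == '。' || c == '！' || c == '？' || c == '…' || c == ';' || c == '，' || c == '.'

def fnbHit (cs : List Char) (p : Char → Bool) (i : Int) : Bool :=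
  decide (i < (cs.length : Int)) && ((cs[i.toNat]?).map p).getD false

-- ===== PORT A =====
-- first backward loop: first i with text[i] a punctuation → i+1
def fnbScanPunct (cs : List Char) : List Int → Option Int
  | [] => none
  | i :: rest => if fnbHit cs fnbPunct i then some (i + 1) else fnbScanPunct cs rest

-- second backward loop: first i with text[i] a space → i+1
def fnbScanSpace (cs : List Char) : List Int → Option Int
  | [] => none
  | i :: rest => if fnbHit cs PySem.Chars.isspace i then some (i + 1) else fnbScanSpace cs rest

def find_natural_break (text : String) (min_len : Int) : Int :=
  let cs := text.toList
  match fnbScanPunct cs (PySem.List.pyRange min_len 0 (-1)) with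
  | some r => r
  | none =>
    match fnbScanSpace cs (PySem.List.pyRange min_len 0 (-1)) with
    | some r => r
    | none => min min_len (cs.length : Int)

-- ===== PORT B =====
-- single backward pass; sp = recorded first (highest) space position, d = final fallback
def fnbScanB (cs : List Char) (d : Int) : List Int → Option Int → Int
  | [], none => d
  | [], some s => s + 1
  | i :: rest, sp =>
    if fnbHit cs fnbPunct i then i + 1
    else fnbScanB cs d rest (if sp.isNone && fnbHit cs PySem.Chars.isspace i then some i else sp)

def find_natural_break_alt (text : String) (min_len : Int) : Int :=
  let cs := text.toList
  fnbScanB cs (min min_len (cs.length : Int)) (PySem.List.pyRange min_len 0 (-1)) none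

-- ===== PRECONDITION & SPEC =====
def Spec_find_natural_break (text : String) (min_len : Int) (out : Int) : Prop := out = find_natural_break_alt text min_len
instance (text : String) (min_len : Int) (out : Int) : Decidable (Spec_find_natural_break text min_len out) := by unfold Spec_find_natural_break; infer_instance

-- ===== CLAIM (what is proved, stated in full; the proofs are below) =====
def Claim_equal_find_natural_break : Prop := ∀ (text : String) (min_len : Int), Dom_find_natural_break text min_len → Spec_find_natural_break text min_len (find_natural_break text min_len)

-- ===== LEMMAS AND PROOFS =====

-- the one-pass scan equals: punctuation scan first; else the recorded space; else the space scan; else d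
theorem fnbScanB_eq (cs : List Char) (d : Int) (l : List Int) (sp : Option Int) :
    fnbScanB cs d l sp =
      match fnbScanPunct cs l with
      | some r => r
      | none =>
        match sp with
        | some s => s + 1
        | none =>
          match fnbScanSpace cs l with
          | some r => r
          | none => d := by
  induction l generalizing sp with
  | nil => cases sp <;> simp [fnbScanB, fnbScanPunct, fnbScanSpace]
  | cons i rest ih =>
    by_cases hp : fnbHit cs fnbPunct i
    · simp [fnbScanB, fnbScanPunct, hp]
    · cases sp with
      | some s => simp [fnbScanB, fnbScanPunct, hp, ih]
      | none =>
        by_cases hs : fnbHit cs PySem.Chars.isspace i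
        · simp [fnbScanB, fnbScanPunct, fnbScanSpace, hp, hs, ih]
        · simp [fnbScanB, fnbScanPunct, fnbScanSpace, hp, hs, ih]

-- ===== VERDICT (by name: the statement is the Claim_ definition above) =====
theorem find_natural_break_spec : Claim_equal_find_natural_break := by
  intro text min_len _
  unfold Spec_find_natural_break find_natural_break find_natural_break_alt
  rw [fnbScanB_eq]
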